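-- pv_equiv track=rewrite | github.com/Lightblues/FA | notebook/process/04_parse_PDL.py | parse_apis
-- ===== SOURCE A (Python) =====
-- def parse_apis(s: str):
--     apis = s.split("\n-")[1:]
--     res = []
--     for s_api in apis:
--         api = {}
--         for line in s_api.strip().split("\n"):
--             k, v = line.strip().split(":", 1)
--             api[k.strip()] = v.strip()
--         res.append(api)
--     return res
-- ===== SOURCE B (Python) =====
-- def parse_apis(s: str):
--     res = []
--     cur = None
--     for line in s.split('\n'):
--         if line.startswith('-'):
--             if cur is not None:
--                 res.append(cur)
--             cur = {}
--             line = line[1:]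
--         if cur is not None:
--             t = line.strip()
--             if t:
--                 k, _, v = t.partition(':')
--                 cur[k.strip()] = v.strip()
--     if cur is not None:
--         res.append(cur)
--     return res
-- ===== Notes on version B (the rewrite author's own statement) =====
-- stated objective: simpler
-- what changed: Replaces A's two-level decomposition (split the whole text on "\n-", then strip and re-split every block into lines and re-parse it) by a single stateful scan over the lines that starts a new record at each line beginning with '-' and folds colon-separated key/value lines into the current record; Pre_ excludes inputs on which A raises ValueError (a block line lacking a colon separator) and inputs whose very first character is '-', a corner where A's split("\n-") treats the dash-opening first line as droppable preamble while the line scan reads it as a record -- either reading is defensible.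
-- outside the precondition, e.g. on parse_apis('-a: 1\n- b: 2'): A returns [{'b': '2'}], B returns [{'a': '1'}, {'b': '2'}]; on parse_apis('-'): A returns [], B returns [{}]; on parse_apis('\n-'): A raises ValueError, B returns [{}]
import Mathlib
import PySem

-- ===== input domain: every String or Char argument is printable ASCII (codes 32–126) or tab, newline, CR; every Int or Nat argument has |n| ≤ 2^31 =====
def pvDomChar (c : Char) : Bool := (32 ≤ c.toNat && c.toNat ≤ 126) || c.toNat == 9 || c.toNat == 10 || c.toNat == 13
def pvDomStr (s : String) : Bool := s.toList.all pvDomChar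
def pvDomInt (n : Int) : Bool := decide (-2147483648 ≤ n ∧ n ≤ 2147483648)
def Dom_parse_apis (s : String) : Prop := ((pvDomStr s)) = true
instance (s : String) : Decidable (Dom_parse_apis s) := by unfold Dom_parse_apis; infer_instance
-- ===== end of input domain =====

-- B replaces A's 'split on "\n-" then re-split and re-parse each block' by a single stateful
-- scan over the lines of the input (objective: simpler one-pass decomposition, not faster).

-- ===== PORT A =====
def parse_apis (s : String) : List (List (String × String)) :=
  let apis := ((PySem.Str.split? s "\n-").getD []).drop 1   -- sep ≠ "" so split? is `some`
  apis.foldl (fun res sApi =>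
    res ++ [(((PySem.Str.split? (PySem.Str.strip sApi) "\n").getD []).foldl
        (fun api line =>
          match PySem.Str.splitMax? (PySem.Str.strip line) ":" 1 with
          | some [k, v] => api.insert (PySem.Str.strip k) (PySem.Str.strip v)
          | _ => api)   -- a line lacking a colon separator is a ValueError in Python: excluded by Pre_
        PySem.Dict.empty).items]) []

-- ===== PORT B =====
def parse_apis_alt (s : String) : List (List (String × String)) :=
  let st := ((PySem.Str.split? s "\n").getD []).foldl
    (fun (st : List (List (String × String)) × Option (PySem.Dict String String)) line0 =>
      -- 'if line.startswith("-"): (flush cur into res); cur = {}; line = line[1:]'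
      let (res, cur, line) :=
        if PySem.Str.startswith line0 "-" then
          ((match st.2 with | some d => st.1 ++ [d.items] | none => st.1),
           (some PySem.Dict.empty : Option (PySem.Dict String String)),
           PySem.Str.slice line0 (some 1) none)
        else (st.1, st.2, line0)
      -- 'if cur is not None: t = line.strip(); if t: k,_,v = t.partition(":"); cur[k.strip()] = v.strip()'
      match cur with
      | none => (res, none)
      | some d =>
        let t := PySem.Str.strip line
        if t = "" then (res, some d)
        else
          -- t.partition(':') ported by hand (exact): key before the first ':', value after; value "" if ':' absent
          match t.toList.dropWhile (· ≠ ':') with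
          | [] => (res, some (d.insert (PySem.Str.strip t) (PySem.Str.strip "")))
          | _ :: r => (res, some (d.insert
              (PySem.Str.strip (String.ofList (t.toList.takeWhile (· ≠ ':'))))
              (PySem.Str.strip (String.ofList r)))))
    ([], none)
  match st.2 with | some d => st.1 ++ [d.items] | none => st.1

-- ===== PRECONDITION & SPEC =====
-- Pre_ excludes (a) the inputs on which Python A raises ValueError — some line of some block
-- (after the block is stripped) lacks a colon separator (blank blocks included) — and (b) inputs whose
-- first character is '-', a corner where A's split("\n-") drops the dash-opening first line as
-- preamble while B's line scan reads it as a record: either reading is defensible.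
def Pre_parse_apis (s : String) : Prop :=
  PySem.Str.startswith s "-" = false ∧
  ∀ b ∈ ((PySem.Str.split? s "\n-").getD []).drop 1,
    ∀ line ∈ (PySem.Str.split? (PySem.Str.strip b) "\n").getD [],
      PySem.Str.isIn ":" line = true
instance (s : String) : Decidable (Pre_parse_apis s) := by unfold Pre_parse_apis; infer_instance

def pvWitness_parse_apis : String := "API list\n- name: get\n  desc: a b\n- name: put\n  desc: c"

def Spec_parse_apis (s : String) (out : List (List (String × String))) : Prop := out = parse_apis_alt s
instance (s : String) (out : List (List (String × String))) : Decidable (Spec_parse_apis s out) := by unfold Spec_parse_apis; infer_instance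

-- ===== CLAIM (what is proved, stated in full; the proofs are below) =====
def Claim_equal_parse_apis : Prop := ∀ (s : String), Dom_parse_apis s → Pre_parse_apis s → Spec_parse_apis s (parse_apis s)

-- ===== LEMMAS AND PROOFS =====

def mySplit (sep : List Char) : List Char → List (List Char)
  | [] => [[]]
  | c :: rest =>
    if sep.isPrefixOf (c :: rest) then [] :: mySplit sep (rest.drop (sep.length - 1))
    else (mySplit sep rest).modifyHead (c :: ·)
termination_by l => l.length
decreasing_by
  · simpa using Nat.lt_succ_of_le (List.length_drop_le _ _)
  · simp

theorem splitOn_go_eq' (sep : List Char) (hsep : sep ≠ []) :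
    ∀ (fuel : Nat) (l cur : List Char) (acc : List (List Char)), l.length < fuel →
      PySem.Chars.splitOn.go sep fuel l cur acc
        = acc.reverse ++ (mySplit sep l).modifyHead (cur.reverse ++ ·) := by
  intro fuel
  induction fuel with
  | zero => intro l cur acc h; omega
  | succ f ih =>
    intro l cur acc h
    cases l with
    | nil => simp [PySem.Chars.splitOn.go, mySplit]
    | cons c rest =>
      by_cases hp : sep.isPrefixOf (c :: rest) = true
      · rw [show PySem.Chars.splitOn.go sep (f+1) (c::rest) cur acc
            = PySem.Chars.splitOn.go sep f (List.drop sep.length (c::rest)) [] (cur.reverse :: acc) by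
          simp [PySem.Chars.splitOn.go, hp]]
        rw [ih _ _ _ (by
          have : sep.length ≥ 1 := by cases sep <;> simp_all
          simp at h ⊢
          omega)]
        have hdrop : List.drop sep.length (c :: rest) = rest.drop (sep.length - 1) := by
          cases sep with
          | nil => simp_all
          | cons a s => simp
        rw [mySplit, if_pos hp, hdrop]
        rcases mySplit sep (List.drop (sep.length - 1) rest) with _ | ⟨h0, t⟩ <;> simp
      · rw [show PySem.Chars.splitOn.go sep (f+1) (c::rest) cur acc
            = PySem.Chars.splitOn.go sep f rest (c :: cur) acc by
          simp [PySem.Chars.splitOn.go, hp]]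
        rw [ih _ _ _ (by simp at h; omega)]
        rw [mySplit, if_neg hp]
        rcases hms : mySplit sep rest with _ | ⟨h0, t⟩
        · simp
        · simp

theorem splitOn_eq_mySplit (s sep : List Char) (hsep : sep ≠ []) :
    PySem.Chars.splitOn s sep = mySplit sep s := by
  unfold PySem.Chars.splitOn
  rw [splitOn_go_eq' sep hsep _ _ _ _ (by omega)]
  rcases h : mySplit sep s with _ | ⟨h0, t⟩ <;> simp

theorem splitOnMax_go_zero : ∀ (fuel : Nat) (l cur : List Char) (acc : List (List Char)),
    PySem.Chars.splitOnMax.go [':'] fuel 0 l cur acc = acc.reverse ++ [cur.reverse ++ l] := by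
  intro fuel l cur acc
  match fuel, l with
  | 0, l => simp [PySem.Chars.splitOnMax.go]
  | f+1, [] => simp [PySem.Chars.splitOnMax.go]
  | f+1, c :: rest => simp [PySem.Chars.splitOnMax.go]

theorem splitOnMax_go_one : ∀ (fuel : Nat) (l cur : List Char) (acc : List (List Char)),
    l.length < fuel →
    PySem.Chars.splitOnMax.go [':'] fuel 1 l cur acc
      = acc.reverse ++ (match l.dropWhile (· ≠ ':') with
          | [] => [cur.reverse ++ l]
          | _ :: r => [cur.reverse ++ l.takeWhile (· ≠ ':'), r]) := by
  intro fuel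
  induction fuel with
  | zero => intro l cur acc h; omega
  | succ f ih =>
    intro l cur acc h
    cases l with
    | nil => simp [PySem.Chars.splitOnMax.go]
    | cons c rest =>
      by_cases hc : c = ':'
      · subst hc
        rw [show PySem.Chars.splitOnMax.go [':'] (f+1) 1 (':'::rest) cur acc
            = PySem.Chars.splitOnMax.go [':'] f 0 rest [] (cur.reverse :: acc) by
          simp [PySem.Chars.splitOnMax.go, List.isPrefixOf]]
        rw [splitOnMax_go_zero]
        simp [List.dropWhile, List.takeWhile]
      · rw [show PySem.Chars.splitOnMax.go [':'] (f+1) 1 (c::rest) cur acc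
            = PySem.Chars.splitOnMax.go [':'] f 1 rest (c :: cur) acc by
          have hnp : List.isPrefixOf [':'] (c::rest) = false := by
            simp [List.isPrefixOf, Ne.symm hc]
          simp [PySem.Chars.splitOnMax.go, hnp]]
        rw [ih _ _ _ (by simp at h; omega)]
        simp only [List.dropWhile, List.takeWhile, hc]
        rcases List.dropWhile (· ≠ ':') rest with _ | ⟨x, r⟩ <;> simp [hc]

theorem splitOnMax_colon_one (t : List Char) :
    PySem.Chars.splitOnMax t [':'] 1
      = (match t.dropWhile (· ≠ ':') with
          | [] => [t]
          | _ :: r => [t.takeWhile (· ≠ ':'), r]) := by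
  unfold PySem.Chars.splitOnMax
  rw [if_neg (by norm_num), show Int.toNat 1 = 1 from rfl]
  rw [splitOnMax_go_one _ _ _ _ (by omega)]
  simp

-- abbreviations
def nlSep : List Char := ['\n']
def ndSep : List Char := ['\n', '-']

theorem mySplit_ne_nil (sep : List Char) (l : List Char) : mySplit sep l ≠ [] := by
  induction l using mySplit.induct sep with
  | case1 => simp [mySplit]
  | case2 c rest hp ih => rw [mySplit, if_pos hp]; simp
  | case3 c rest hp ih =>
    rw [mySplit, if_neg hp]
    rcases h : mySplit sep rest with _ | ⟨h0, t⟩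
    · exact absurd h ih
    · simp

theorem mySplit_nl_cons_nl (r : List Char) : mySplit nlSep ('\n' :: r) = [] :: mySplit nlSep r := by
  rw [mySplit, if_pos (by simp [nlSep, List.isPrefixOf])]
  simp [nlSep]

theorem mySplit_nl_cons (c : Char) (r : List Char) (hc : c ≠ '\n') :
    mySplit nlSep (c :: r) = (mySplit nlSep r).modifyHead (c :: ·) := by
  rw [mySplit, if_neg (by simp [nlSep, List.isPrefixOf, Ne.symm hc])]

theorem noNL_mySplit (cs : List Char) : ∀ l ∈ mySplit nlSep cs, '\n' ∉ l := by
  induction cs with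
  | nil => simp [mySplit]
  | cons c rest ih =>
    by_cases hc : c = '\n'
    · subst hc; rw [mySplit_nl_cons_nl]
      intro l hl
      rcases List.mem_cons.mp hl with hl | hl
      · simp [hl]
      · exact ih l hl
    · rw [mySplit_nl_cons c rest hc]
      rcases h : mySplit nlSep rest with _ | ⟨h0, t⟩
      · exact absurd h (mySplit_ne_nil _ _)
      · intro l hl
        rcases List.mem_cons.mp hl with hl | hl
        · subst hl
          have := ih h0 (by rw [h]; exact List.mem_cons_self)
          simp [Ne.symm hc, this]
        · exact ih l (by rw [h]; exact List.mem_cons_of_mem _ hl)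

def glue : List Char → List (List Char) → List (List Char)
  | acc, [] => [acc]
  | acc, x :: xs => if x.head? = some '-' then acc :: glue x.tail xs else glue (acc ++ '\n' :: x) xs

def glue2 : List (List Char) → List (List Char)
  | [] => [[]]
  | l :: ls => glue l ls

theorem glue_append (xs : List (List Char)) : ∀ (p acc : List Char),
    glue (p ++ acc) xs = (glue acc xs).modifyHead (p ++ ·) := by
  induction xs with
  | nil => intro p acc; simp [glue]
  | cons x xs ih =>
    intro p acc
    by_cases hx : x.head? = some '-'
    · simp [glue, hx]
    · rw [glue, glue, if_neg hx, if_neg hx, List.append_assoc] at *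
      exact ih p (acc ++ '\n' :: x)

theorem mySplit_head_cons (a : Char) (r' : List Char) (ha : a ≠ '\n') :
    ∃ h t', mySplit nlSep (a :: r') = (a :: h) :: t' := by
  rw [mySplit_nl_cons a r' ha]
  rcases h2 : mySplit nlSep r' with _ | ⟨z, zs⟩
  · exact absurd h2 (mySplit_ne_nil _ _)
  · exact ⟨z, zs, by simp⟩

theorem mySplit_nd_sep (r : List Char) :
    mySplit ndSep ('\n' :: '-' :: r) = [] :: mySplit ndSep r := by
  rw [mySplit, if_pos (by simp [ndSep, List.isPrefixOf])]
  simp [ndSep]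

theorem mySplit_nd_nl (r : List Char) (hr : r.head? ≠ some '-') :
    mySplit ndSep ('\n' :: r) = (mySplit ndSep r).modifyHead ('\n' :: ·) := by
  rw [mySplit, if_neg (by
    cases r with
    | nil => simp [ndSep, List.isPrefixOf]
    | cons a r' =>
      simp [ndSep, List.isPrefixOf]
      intro hcon
      exact hr (by simp [← hcon]))]

theorem mySplit_nd_cons (c : Char) (r : List Char) (hc : c ≠ '\n') :
    mySplit ndSep (c :: r) = (mySplit ndSep r).modifyHead (c :: ·) := by
  rw [mySplit, if_neg (by simp [ndSep, List.isPrefixOf, Ne.symm hc])]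

theorem mySplit_nd_eq_glue : ∀ (cs : List Char), mySplit ndSep cs = glue2 (mySplit nlSep cs) := by
  intro cs
  induction hn : cs.length using Nat.strong_induction_on generalizing cs with
  | _ n ih =>
  subst hn
  cases cs with
  | nil => simp [mySplit, glue2, glue]
  | cons c r =>
    by_cases hc : c = '\n'
    · subst hc
      by_cases hsep : r.head? = some '-'
      · obtain ⟨r2, hr2⟩ : ∃ r2, r = '-' :: r2 := by
          cases r with
          | nil => simp at hsep
          | cons a r' => simp at hsep; exact ⟨r', by simp [hsep]⟩
        subst hr2
        rw [mySplit_nd_sep, mySplit_nl_cons_nl, mySplit_nl_cons '-' r2 (by decide)]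
        rcases h : mySplit nlSep r2 with _ | ⟨m0, ms⟩
        · exact absurd h (mySplit_ne_nil _ _)
        · rw [ih r2.length (by simp) r2 rfl, h]
          simp [glue2, glue]
      · rw [mySplit_nd_nl r hsep, mySplit_nl_cons_nl]
        rcases h : mySplit nlSep r with _ | ⟨m0, ms⟩
        · exact absurd h (mySplit_ne_nil _ _)
        · have hm0 : m0.head? ≠ some '-' := by
            cases r with
            | nil =>
              simp [mySplit] at h
              simp [h.1]
            | cons a r' =>
              by_cases hane : a = '\n'
              · subst hane
                rw [mySplit_nl_cons_nl] at h
                simp at h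
                simp [h.1]
              · rcases mySplit_head_cons a r' hane with ⟨hh, tt, heq⟩
                rw [heq] at h
                simp at h
                rcases h with ⟨h1, -⟩
                rw [← h1]
                simp at hsep ⊢
                simpa using hsep
          rw [ih r.length (by simp) r rfl, h]
          simp only [glue2]
          rw [glue, if_neg hm0]
          rw [show ([] : List Char) ++ '\n' :: m0 = ['\n'] ++ m0 from rfl, glue_append]
          rfl
    · rw [mySplit_nd_cons c r hc, mySplit_nl_cons c r hc]
      rcases h : mySplit nlSep r with _ | ⟨m0, ms⟩
      · exact absurd h (mySplit_ne_nil _ _)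
      · rw [ih r.length (by simp) r rfl, h]
        show (glue m0 ms).modifyHead (c :: ·) = glue (c :: m0) ms
        rw [show (c :: m0) = [c] ++ m0 from rfl, glue_append]
        rfl

def tailPart : List (List Char) → List (List Char)
  | [] => []
  | x :: xs => if x.head? = some '-' then glue x.tail xs else tailPart xs

theorem tail_glue (xs : List (List Char)) (acc : List Char) : (glue acc xs).tail = tailPart xs := by
  induction xs generalizing acc with
  | nil => simp [glue, tailPart]
  | cons x xs ih =>
    by_cases hx : x.head? = some '-'
    · simp [glue, tailPart, hx]
    · rw [glue, if_neg hx, tailPart, if_neg hx]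
      exact ih _

theorem dropWhile_idem' (p : Char → Bool) (l : List Char) :
    (l.dropWhile p).dropWhile p = l.dropWhile p := by
  induction l with
  | nil => simp
  | cons c r ih =>
    by_cases hp : p c
    · simp [List.dropWhile_cons, hp, ih]
    · simp [List.dropWhile_cons, hp]

theorem rstrip_cons (c : Char) (r : List Char) :
    PySem.Chars.rstrip (c :: r)
      = if PySem.Chars.rstrip r = [] then (if PySem.Chars.isspace c then [] else [c])
        else c :: PySem.Chars.rstrip r := by
  simp only [PySem.Chars.rstrip, List.reverse_cons]
  rw [List.dropWhile_append]
  by_cases h : PySem.Chars.rstrip r = []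
  · have h' : (r.reverse.dropWhile PySem.Chars.isspace) = [] := by
      simpa [PySem.Chars.rstrip] using congrArg List.reverse h
    simp [h', h]
    by_cases hc : PySem.Chars.isspace c <;> simp [hc]
  · have h' : ¬ (r.reverse.dropWhile PySem.Chars.isspace) = [] := by
      intro hcon
      exact h (by simp [PySem.Chars.rstrip, hcon])
    simp [List.isEmpty_iff, h', h, PySem.Chars.rstrip]

theorem lstrip_rstrip_comm (l : List Char) :
    PySem.Chars.rstrip (PySem.Chars.lstrip l) = PySem.Chars.lstrip (PySem.Chars.rstrip l) := by
  induction l with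
  | nil => simp [PySem.Chars.lstrip, PySem.Chars.rstrip]
  | cons c r ih =>
    by_cases hc : PySem.Chars.isspace c
    · rw [show PySem.Chars.lstrip (c :: r) = PySem.Chars.lstrip r by
        simp [PySem.Chars.lstrip, List.dropWhile_cons, hc]]
      rw [ih, rstrip_cons]
      by_cases h : PySem.Chars.rstrip r = []
      · simp [h, hc, PySem.Chars.lstrip]
      · simp [h]
        rw [show PySem.Chars.lstrip (c :: PySem.Chars.rstrip r)
            = PySem.Chars.lstrip (PySem.Chars.rstrip r) by
          simp [PySem.Chars.lstrip, List.dropWhile_cons, hc]]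
    · rw [show PySem.Chars.lstrip (c :: r) = c :: r by
        simp [PySem.Chars.lstrip, List.dropWhile_cons, hc]]
      rw [rstrip_cons]
      by_cases h : PySem.Chars.rstrip r = []
      · simp [h, hc, PySem.Chars.lstrip, List.dropWhile_cons]
      · simp [h, PySem.Chars.lstrip, List.dropWhile_cons, hc]

theorem strip_eq_lstrip_rstrip (l : List Char) :
    PySem.Chars.strip l = PySem.Chars.lstrip (PySem.Chars.rstrip l) := by
  rw [PySem.Chars.strip, lstrip_rstrip_comm]

theorem strip_cons_ws (c : Char) (l : List Char) (hc : PySem.Chars.isspace c = true) :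
    PySem.Chars.strip (c :: l) = PySem.Chars.strip l := by
  simp [PySem.Chars.strip, PySem.Chars.lstrip, List.dropWhile_cons, hc]

theorem strip_append_ws (l : List Char) (w : Char) (hw : PySem.Chars.isspace w = true) :
    PySem.Chars.strip (l ++ [w]) = PySem.Chars.strip l := by
  rw [strip_eq_lstrip_rstrip, strip_eq_lstrip_rstrip]
  congr 1
  simp [PySem.Chars.rstrip, List.dropWhile_cons, hw]

theorem rstrip_idem (l : List Char) :
    PySem.Chars.rstrip (PySem.Chars.rstrip l) = PySem.Chars.rstrip l := by
  simp [PySem.Chars.rstrip, dropWhile_idem']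

theorem lstrip_idem (l : List Char) :
    PySem.Chars.lstrip (PySem.Chars.lstrip l) = PySem.Chars.lstrip l := by
  simp [PySem.Chars.lstrip, dropWhile_idem']

theorem strip_idem (l : List Char) :
    PySem.Chars.strip (PySem.Chars.strip l) = PySem.Chars.strip l := by
  rw [strip_eq_lstrip_rstrip (PySem.Chars.strip l)]
  rw [show PySem.Chars.strip l = PySem.Chars.rstrip (PySem.Chars.lstrip l) from rfl]
  rw [rstrip_idem, ← lstrip_rstrip_comm, lstrip_idem]

theorem modifyLast_cons' {α : Type} (f : α → α) (x : α) (ys : List α) (h : ys ≠ []) :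
    List.modifyLast f (x :: ys) = x :: List.modifyLast f ys :=
  List.modifyLast_append_of_right_ne_nil f [x] ys h

theorem modifyLast_singleton {α : Type} (f : α → α) (x : α) :
    List.modifyLast f [x] = [f x] := by
  simpa using List.modifyLast_concat f x []

-- chars-level field step (the meaning of B's partition-and-insert statement on the char level)
def procC (api : PySem.Dict String String) (l : List Char) : PySem.Dict String String :=
  let t := PySem.Chars.strip l
  if t = [] then api
  else
    match t.dropWhile (· ≠ ':') with
    | [] => api.insert (String.ofList (PySem.Chars.strip t)) (String.ofList (PySem.Chars.strip []))
    | _ :: r => api.insert (String.ofList (PySem.Chars.strip (t.takeWhile (· ≠ ':'))))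
                           (String.ofList (PySem.Chars.strip r))

theorem procC_strip (api : PySem.Dict String String) (l : List Char) :
    procC api (PySem.Chars.strip l) = procC api l := by
  simp only [procC, strip_idem]

-- the stripped non-blank lines of a chunk
def canonV (cs : List Char) : List (List Char) :=
  (mySplit nlSep cs).filterMap (fun l =>
    if PySem.Chars.strip l = [] then none else some (PySem.Chars.strip l))

theorem foldl_procC_filterMap (M : List (List Char)) : ∀ (d : PySem.Dict String String),
    M.foldl procC d
      = (M.filterMap (fun l =>
          if PySem.Chars.strip l = [] then none else some (PySem.Chars.strip l))).foldl procC d := by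
  induction M with
  | nil => intro d; simp
  | cons l M ih =>
    intro d
    by_cases hb : PySem.Chars.strip l = []
    · rw [List.foldl_cons, show procC d l = d from by simp [procC, hb], ih,
        show List.filterMap (fun l =>
            if PySem.Chars.strip l = [] then none else some (PySem.Chars.strip l)) (l :: M)
          = List.filterMap (fun l =>
            if PySem.Chars.strip l = [] then none else some (PySem.Chars.strip l)) M from by
          simp [List.filterMap_cons, hb]]
    · rw [List.foldl_cons, ih,
        show List.filterMap (fun l =>
            if PySem.Chars.strip l = [] then none else some (PySem.Chars.strip l)) (l :: M)
          = PySem.Chars.strip l :: List.filterMap (fun l =>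
            if PySem.Chars.strip l = [] then none else some (PySem.Chars.strip l)) M from by
          simp [List.filterMap_cons, hb],
        List.foldl_cons, procC_strip]

theorem filterMap_modifyHead_invar {α β : Type} (g : α → Option β) (f : α → α)
    (h : ∀ x, g (f x) = g x) (M : List α) : (M.modifyHead f).filterMap g = M.filterMap g := by
  cases M with
  | nil => rfl
  | cons x xs => simp [List.filterMap_cons, h]

theorem filterMap_modifyLast_invar {α β : Type} (g : α → Option β) (f : α → α)
    (h : ∀ x, g (f x) = g x) : ∀ (M : List α), (M.modifyLast f).filterMap g = M.filterMap g := by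
  intro M
  induction M using List.reverseRecOn with
  | nil => rfl
  | append_singleton xs x ih =>
    rw [List.modifyLast_concat, List.filterMap_append, List.filterMap_append,
      List.filterMap_cons, List.filterMap_cons, h]

theorem canonV_lstrip (cs : List Char) : canonV (PySem.Chars.lstrip cs) = canonV cs := by
  induction cs with
  | nil => rfl
  | cons c r ih =>
    by_cases hc : PySem.Chars.isspace c
    · rw [show PySem.Chars.lstrip (c :: r) = PySem.Chars.lstrip r by
        simp [PySem.Chars.lstrip, List.dropWhile_cons, hc]]
      rw [ih]
      by_cases hnl : c = '\n'
      · subst hnl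
        simp [canonV, mySplit_nl_cons_nl, List.filterMap_cons, PySem.Chars.strip,
          PySem.Chars.lstrip, PySem.Chars.rstrip]
      · simp only [canonV]
        rw [mySplit_nl_cons c r hnl]
        rw [filterMap_modifyHead_invar _ _ (fun x => by rw [strip_cons_ws c x hc])]
    · rw [show PySem.Chars.lstrip (c :: r) = c :: r by
        simp [PySem.Chars.lstrip, List.dropWhile_cons, hc]]

-- lines of (a ++ [w])
theorem mySplit_nl_append_char (a : List Char) (w : Char) :
    mySplit nlSep (a ++ [w])
      = if w = '\n' then mySplit nlSep a ++ [[]]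
        else (mySplit nlSep a).modifyLast (· ++ [w]) := by
  induction a with
  | nil =>
    by_cases hw : w = '\n'
    · subst hw; simp [mySplit_nl_cons_nl, mySplit]
    · rw [if_neg hw]
      simp only [List.nil_append]
      rw [mySplit_nl_cons w [] hw]
      simp [mySplit, modifyLast_singleton]
  | cons c a' ih =>
    by_cases hc : c = '\n'
    · subst hc
      rw [show ('\n' :: a') ++ [w] = '\n' :: (a' ++ [w]) from rfl]
      rw [mySplit_nl_cons_nl, mySplit_nl_cons_nl, ih]
      by_cases hw : w = '\n'
      · simp [hw]
      · rw [if_neg hw, if_neg hw]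
        rcases h : mySplit nlSep a' with _ | ⟨m0, ms⟩
        · exact absurd h (mySplit_ne_nil _ _)
        · conv_rhs => rw [modifyLast_cons' _ _ _ (by simp)]
    · rw [show (c :: a') ++ [w] = c :: (a' ++ [w]) from rfl]
      rw [mySplit_nl_cons c _ hc, mySplit_nl_cons c a' hc, ih]
      by_cases hw : w = '\n'
      · rcases h : mySplit nlSep a' with _ | ⟨m0, ms⟩
        · exact absurd h (mySplit_ne_nil _ _)
        · simp [hw]
      · rcases h : mySplit nlSep a' with _ | ⟨m0, ms⟩
        · exact absurd h (mySplit_ne_nil _ _)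
        · rw [if_neg hw, if_neg hw]
          cases ms with
          | nil => simp [modifyLast_singleton]
          | cons y ys =>
            conv_lhs => rw [modifyLast_cons' _ _ _ (by simp)]
            conv_rhs => rw [show List.modifyHead (fun x => c :: x) (m0 :: y :: ys)
                = (c :: m0) :: y :: ys from rfl,
              modifyLast_cons' _ _ _ (by simp)]
            simp

theorem canonV_rstrip (cs : List Char) : canonV (PySem.Chars.rstrip cs) = canonV cs := by
  induction cs using List.reverseRecOn with
  | nil => rfl
  | append_singleton a w ih =>
    by_cases hw : PySem.Chars.isspace w
    · rw [show PySem.Chars.rstrip (a ++ [w]) = PySem.Chars.rstrip a by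
        simp [PySem.Chars.rstrip, List.dropWhile_cons, hw]]
      rw [ih]
      simp only [canonV]
      rw [mySplit_nl_append_char]
      by_cases hnl : w = '\n'
      · rw [if_pos hnl]
        simp [List.filterMap_append, PySem.Chars.strip, PySem.Chars.lstrip, PySem.Chars.rstrip]
      · rw [if_neg hnl]
        rw [filterMap_modifyLast_invar _ _ (fun x => by rw [strip_append_ws x w hw])]
    · rw [show PySem.Chars.rstrip (a ++ [w]) = a ++ [w] by
        simp [PySem.Chars.rstrip, List.dropWhile_cons, hw]]

theorem canonV_strip (cs : List Char) : canonV (PySem.Chars.strip cs) = canonV cs := by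
  rw [show PySem.Chars.strip cs = PySem.Chars.rstrip (PySem.Chars.lstrip cs) from rfl]
  rw [canonV_rstrip, canonV_lstrip]

def joinNL : List (List Char) → List Char
  | [] => []
  | [l] => l
  | l :: (m :: ls) => l ++ '\n' :: joinNL (m :: ls)

theorem joinNL_cons_cons (l m : List Char) (ls : List (List Char)) :
    joinNL (l :: m :: ls) = l ++ '\n' :: joinNL (m :: ls) := rfl

theorem joinNL_append_singleton (L : List (List Char)) (hL : L ≠ []) (x : List Char) :
    joinNL (L ++ [x]) = joinNL L ++ '\n' :: x := by
  induction L with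
  | nil => simp at hL
  | cons l L ih =>
    cases L with
    | nil => simp [joinNL]
    | cons m L' =>
      rw [show (l :: m :: L') ++ [x] = l :: ((m :: L') ++ [x]) from rfl,
        show (m :: L') ++ [x] = m :: (L' ++ [x]) from rfl, joinNL_cons_cons,
        show (m : List Char) :: (L' ++ [x]) = (m :: L') ++ [x] from rfl, ih (by simp),
        joinNL_cons_cons]
      simp

theorem mySplit_nl_line_append (l : List Char) (hl : '\n' ∉ l) : ∀ (cs : List Char),
    mySplit nlSep (l ++ cs) = (mySplit nlSep cs).modifyHead (l ++ ·) := by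
  induction l with
  | nil =>
    intro cs
    rcases h : mySplit nlSep cs with _ | ⟨m0, ms⟩
    · exact absurd h (mySplit_ne_nil _ _)
    · simp only [List.nil_append]
      rw [h]; simp
  | cons c l' ih =>
    intro cs
    have hc : c ≠ '\n' := by intro hcon; exact hl (by simp [hcon])
    rw [show (c :: l') ++ cs = c :: (l' ++ cs) from rfl, mySplit_nl_cons _ _ hc,
      ih (by intro hcon; exact hl (by simp [hcon])) cs]
    rcases h : mySplit nlSep cs with _ | ⟨m0, ms⟩
    · exact absurd h (mySplit_ne_nil _ _)
    · simp

theorem mySplit_nl_joinNL : ∀ (L : List (List Char)), L ≠ [] → (∀ l ∈ L, '\n' ∉ l) →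
    mySplit nlSep (joinNL L) = L := by
  intro L
  induction L with
  | nil => intro h; simp at h
  | cons l L' ih =>
    intro _ hnl
    cases L' with
    | nil =>
      rw [joinNL, show l = l ++ [] by simp, mySplit_nl_line_append l (hnl l (by simp))]
      simp [mySplit]
    | cons m ls =>
      rw [joinNL, mySplit_nl_line_append l (hnl l (by simp)), mySplit_nl_cons_nl,
        ih (by simp) (fun x hx => hnl x (List.mem_cons_of_mem _ hx))]
      simp

theorem dropWhile_colon_of_mem (t : List Char) (h : ':' ∈ t) :
    ∃ r, t.dropWhile (· ≠ ':') = ':' :: r := by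
  induction t with
  | nil => simp at h
  | cons c r ih =>
    by_cases hc : c = ':'
    · subst hc; exact ⟨r, by simp [List.dropWhile_cons]⟩
    · have h1 : ':' ∈ r := by
        rcases List.mem_cons.mp h with h1 | h1
        · exact absurd h1.symm hc
        · exact h1
      rcases ih h1 with ⟨r', hr'⟩
      exact ⟨r', by simpa [List.dropWhile_cons, hc] using hr'⟩

theorem mem_dropWhile_of_mem (p : Char → Bool) (l : List Char) (c : Char)
    (hc : p c = false) (h : c ∈ l) : c ∈ l.dropWhile p := by
  rcases List.mem_append.mp (by rw [List.takeWhile_append_dropWhile]; exact h :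
      c ∈ l.takeWhile p ++ l.dropWhile p) with h1 | h1
  · exact absurd (List.mem_takeWhile_imp h1) (by simp [hc])
  · exact h1

theorem mem_strip_of_mem (l : List Char) (c : Char) (hc : PySem.Chars.isspace c = false)
    (h : c ∈ l) : c ∈ PySem.Chars.strip l := by
  have h1 : c ∈ PySem.Chars.lstrip l := mem_dropWhile_of_mem _ _ _ hc h
  simp only [PySem.Chars.strip, PySem.Chars.rstrip, List.mem_reverse]
  exact mem_dropWhile_of_mem _ _ _ hc (by simpa using h1)

-- chars-level A line step
def stepAC (api : PySem.Dict String String) (l : List Char) : PySem.Dict String String :=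
  match PySem.Chars.splitOnMax (PySem.Chars.strip l) [':'] 1 with
  | [k, v] => api.insert (String.ofList (PySem.Chars.strip k)) (String.ofList (PySem.Chars.strip v))
  | _ => api

theorem stepAC_eq_procC (api : PySem.Dict String String) (l : List Char)
    (h : ':' ∈ PySem.Chars.strip l) : stepAC api l = procC api l := by
  rcases dropWhile_colon_of_mem _ h with ⟨r, hr⟩
  have ht : PySem.Chars.strip l ≠ [] := by intro hcon; rw [hcon] at h; simp at h
  rw [stepAC, splitOnMax_colon_one, hr]
  rw [procC]
  simp only [ht, if_neg, hr]
  simp [ht]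

-- per-block: A's parse of the stripped block = procC-fold over the raw lines of the block
theorem perBlock (c : List Char) (d : PySem.Dict String String)
    (hP : ∀ l ∈ mySplit nlSep (PySem.Chars.strip c), ':' ∈ l) :
    (mySplit nlSep (PySem.Chars.strip c)).foldl stepAC d
      = (mySplit nlSep c).foldl procC d := by
  rw [PySem.List.foldl_congr_mem _ stepAC procC d (fun acc l hl =>
    stepAC_eq_procC acc l (mem_strip_of_mem l ':' (by decide) (hP l hl)))]
  rw [foldl_procC_filterMap]
  rw [show (mySplit nlSep (PySem.Chars.strip c)).filterMap (fun l =>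
      if PySem.Chars.strip l = [] then none else some (PySem.Chars.strip l)) = canonV (PySem.Chars.strip c) from rfl]
  rw [canonV_strip]
  rw [show canonV c = (mySplit nlSep c).filterMap (fun l =>
      if PySem.Chars.strip l = [] then none else some (PySem.Chars.strip l)) from rfl]
  rw [← foldl_procC_filterMap]

-- B machinery at char level
def flushB (st : List (List (String × String)) × Option (PySem.Dict String String)) :
    List (List (String × String)) :=
  match st.2 with | some d => st.1 ++ [d.items] | none => st.1

def stepBC (st : List (List (String × String)) × Option (PySem.Dict String String))
    (l : List Char) : List (List (String × String)) × Option (PySem.Dict String String) :=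
  if l.head? = some '-' then (flushB st, some (procC PySem.Dict.empty l.tail))
  else match st.2 with
    | none => st
    | some d => (st.1, some (procC d l))

def itemsA (b : List Char) : List (String × String) :=
  ((mySplit nlSep (PySem.Chars.strip b)).foldl stepAC PySem.Dict.empty).items

theorem fold_some (xs : List (List Char)) : ∀ (res : List (List (String × String)))
    (accL : List (List Char)), accL ≠ [] → (∀ l ∈ accL, '\n' ∉ l) → (∀ l ∈ xs, '\n' ∉ l) →
    (∀ b ∈ glue (joinNL accL) xs, ∀ l ∈ mySplit nlSep (PySem.Chars.strip b), ':' ∈ l) →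
    flushB (xs.foldl stepBC (res, some (accL.foldl procC PySem.Dict.empty)))
      = res ++ (glue (joinNL accL) xs).map itemsA := by
  induction xs with
  | nil =>
    intro res accL hne hnl _ hP
    simp only [List.foldl_nil, flushB, glue, List.map]
    rw [itemsA, perBlock _ _ (hP _ (by simp [glue])), mySplit_nl_joinNL accL hne hnl]
  | cons x xs ih =>
    intro res accL hne hnl hxs hP
    by_cases hx : x.head? = some '-'
    · rw [List.foldl_cons, show stepBC (res, some (accL.foldl procC PySem.Dict.empty)) x
          = (res ++ [(accL.foldl procC PySem.Dict.empty).items], some (procC PySem.Dict.empty x.tail))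
        from by simp [stepBC, hx, flushB]]
      have hglue : glue (joinNL accL) (x :: xs) = joinNL accL :: glue x.tail xs := by
        rw [glue, if_pos hx]
      rw [show (procC PySem.Dict.empty x.tail)
          = ([x.tail] : List (List Char)).foldl procC PySem.Dict.empty from rfl]
      rw [ih _ [x.tail] (by simp)
        (by intro l hl; simp at hl; subst hl
            intro hcon
            exact hxs x (by simp) (List.mem_of_mem_tail hcon))
        (fun l hl => hxs l (List.mem_cons_of_mem _ hl))
        (by intro b hb; exact hP b (by rw [hglue]; exact List.mem_cons_of_mem _ hb))]
      rw [hglue]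
      simp only [List.map]
      rw [itemsA, perBlock _ _ (hP _ (by rw [hglue]; exact List.mem_cons_self)),
        mySplit_nl_joinNL accL hne hnl]
      rw [show joinNL [x.tail] = x.tail from rfl]
      simp
    · rw [List.foldl_cons, show stepBC (res, some (accL.foldl procC PySem.Dict.empty)) x
          = (res, some (procC (accL.foldl procC PySem.Dict.empty) x)) from by simp [stepBC, hx]]
      have hglue : glue (joinNL accL) (x :: xs) = glue (joinNL (accL ++ [x])) xs := by
        rw [glue, if_neg hx, joinNL_append_singleton accL hne x]
      rw [show procC (accL.foldl procC PySem.Dict.empty) x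
          = (accL ++ [x]).foldl procC PySem.Dict.empty from by simp [List.foldl_append]]
      rw [ih res (accL ++ [x]) (by simp)
        (by intro l hl
            rcases List.mem_append.mp hl with h1 | h1
            · exact hnl l h1
            · simp at h1; subst h1; exact hxs l (by simp))
        (fun l hl => hxs l (List.mem_cons_of_mem _ hl))
        (by intro b hb; exact hP b (by rw [hglue]; exact hb))]
      rw [hglue]

theorem fold_none (xs : List (List Char)) : ∀ (res : List (List (String × String))),
    (∀ l ∈ xs, '\n' ∉ l) →
    (∀ b ∈ tailPart xs, ∀ l ∈ mySplit nlSep (PySem.Chars.strip b), ':' ∈ l) →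
    flushB (xs.foldl stepBC (res, none)) = res ++ (tailPart xs).map itemsA := by
  induction xs with
  | nil => intro res _ _; simp [flushB, tailPart]
  | cons x xs ih =>
    intro res hxs hP
    by_cases hx : x.head? = some '-'
    · rw [List.foldl_cons, show stepBC (res, none) x
          = (res, some (procC PySem.Dict.empty x.tail)) from by simp [stepBC, hx, flushB]]
      rw [show (procC PySem.Dict.empty x.tail)
          = ([x.tail] : List (List Char)).foldl procC PySem.Dict.empty from rfl]
      rw [fold_some xs res [x.tail] (by simp)
        (by intro l hl; simp at hl; subst hl
            intro hcon
            exact hxs x (by simp) (List.mem_of_mem_tail hcon))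
        (fun l hl => hxs l (List.mem_cons_of_mem _ hl))
        (by intro b hb
            refine hP b ?_
            rw [tailPart, if_pos hx]
            rw [show joinNL [x.tail] = x.tail from rfl] at hb
            exact hb)]
      rw [tailPart, if_pos hx, show joinNL [x.tail] = x.tail from rfl]
    · rw [List.foldl_cons, show stepBC (res, none) x = (res, none) from by simp [stepBC, hx]]
      rw [ih res (fun l hl => hxs l (List.mem_cons_of_mem _ hl))
        (by intro b hb; refine hP b ?_; rw [tailPart, if_neg hx]; exact hb)]
      rw [tailPart, if_neg hx]

theorem stepA_str (api : PySem.Dict String String) (l : List Char) :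
    (match PySem.Str.splitMax? (PySem.Str.strip (String.ofList l)) ":" 1 with
      | some [k, v] => api.insert (PySem.Str.strip k) (PySem.Str.strip v)
      | _ => api) = stepAC api l := by
  have h1 : PySem.Str.splitMax? (PySem.Str.strip (String.ofList l)) ":" 1
      = some ((PySem.Chars.splitOnMax (PySem.Chars.strip l) [':'] 1).map String.ofList) := by
    simp [PySem.Str.splitMax?, PySem.Chars.splitMax?, PySem.Str.strip]
  rw [h1, stepAC]
  rcases PySem.Chars.splitOnMax (PySem.Chars.strip l) [':'] 1 with _|⟨a,_|⟨b,_|⟨c,rest⟩⟩⟩ <;>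
    simp [PySem.Str.strip]

set_option maxHeartbeats 1000000 in
theorem portA_char (s : String) :
    parse_apis s = ((mySplit ndSep s.toList).drop 1).map itemsA := by
  unfold parse_apis
  have h1 : (PySem.Str.split? s "\n-").getD []
      = (PySem.Chars.splitOn s.toList ['\n', '-']).map String.ofList := by
    simp [PySem.Str.split?, PySem.Chars.split?]
  rw [h1, splitOn_eq_mySplit _ _ (by decide), ← List.map_drop,
    PySem.List.foldl_append_singleton_eq_map, List.map_map, List.nil_append]
  refine List.map_congr_left (fun b _ => ?_)
  simp only [Function.comp_apply]
  have h2 : (PySem.Str.split? (PySem.Str.strip (String.ofList b)) "\n").getD []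
      = (mySplit nlSep (PySem.Chars.strip b)).map String.ofList := by
    have h3 := splitOn_eq_mySplit (PySem.Chars.strip b) nlSep (by decide)
    simp [PySem.Str.split?, PySem.Chars.split?, PySem.Str.strip]
    rw [show (['\n'] : List Char) = nlSep from rfl, h3]
  rw [h2, List.foldl_map, itemsA]
  congr 1
  exact PySem.List.foldl_congr_mem _ _ _ _ (fun acc x _ => stepA_str acc x)

theorem ofList_eq_empty_iff (x : List Char) : (String.ofList x = "") ↔ x = [] := by
  constructor
  · intro h; have := congrArg String.toList h; simpa using this
  · intro h; simp [h]

-- B's inlined field statement, at the string level, equals procC at the char level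
theorem field_char (d : PySem.Dict String String) (l : List Char) :
    (let t := PySem.Str.strip (String.ofList l)
     if t = "" then d
     else
       match t.toList.dropWhile (· ≠ ':') with
       | [] => d.insert (PySem.Str.strip t) (PySem.Str.strip "")
       | _ :: r => d.insert
           (PySem.Str.strip (String.ofList (t.toList.takeWhile (· ≠ ':'))))
           (PySem.Str.strip (String.ofList r))) = procC d l := by
  rw [procC]
  simp only [PySem.Str.strip, String.toList_ofList]
  by_cases h : PySem.Chars.strip l = []
  · rw [if_pos (by rw [ofList_eq_empty_iff]; exact h), if_pos h]
  · rw [if_neg (by rw [ofList_eq_empty_iff]; exact h), if_neg h]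
    rcases hd : (PySem.Chars.strip l).dropWhile (· ≠ ':') with _ | ⟨a, r⟩ <;>
      simp [PySem.Str.strip]

theorem startswith_dash (l : List Char) :
    PySem.Str.startswith (String.ofList l) "-" = decide (l.head? = some '-') := by
  have : PySem.Str.startswith (String.ofList l) "-" = List.isPrefixOf ['-'] l := by
    simp [PySem.Str.startswith, PySem.Chars.startswith]
  rw [this]
  cases l with
  | nil => simp
  | cons c r =>
    by_cases hc : c = '-'
    · subst hc; simp [List.isPrefixOf]
    · simp [List.isPrefixOf, hc, Ne.symm hc]

theorem slice_tail (l : List Char) :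
    PySem.Str.slice (String.ofList l) (some 1) none = String.ofList l.tail := by
  simp [PySem.Str.slice, PySem.Chars.slice, PySem.List.slice_from_one]

theorem fieldPair_char (res : List (List (String × String))) (d : PySem.Dict String String)
    (l : List Char) :
    (if PySem.Str.strip (String.ofList l) = "" then (res, some d)
     else
       match (PySem.Str.strip (String.ofList l)).toList.dropWhile (· ≠ ':') with
       | [] => (res, some (d.insert (PySem.Str.strip (PySem.Str.strip (String.ofList l)))
                 (PySem.Str.strip "")))
       | _ :: r => (res, some (d.insert
           (PySem.Str.strip (String.ofList ((PySem.Str.strip (String.ofList l)).toList.takeWhile (· ≠ ':'))))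
           (PySem.Str.strip (String.ofList r)))))
    = (res, (some (procC d l) : Option (PySem.Dict String String))) := by
  have hf := field_char d l
  dsimp only at hf
  by_cases ht : PySem.Str.strip (String.ofList l) = ""
  · rw [if_pos ht] at hf ⊢
    rw [← hf]
  · rw [if_neg ht] at hf ⊢
    rcases hd : (PySem.Str.strip (String.ofList l)).toList.dropWhile (· ≠ ':') with _ | ⟨a, r⟩ <;> rw [hd] at hf <;>
      dsimp only at hf ⊢ <;> rw [← hf]

set_option maxHeartbeats 1000000 in
theorem portB_char (s : String) :
    parse_apis_alt s = flushB ((mySplit nlSep s.toList).foldl stepBC ([], none)) := by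
  unfold parse_apis_alt
  have h1 : (PySem.Str.split? s "\n").getD []
      = (mySplit nlSep s.toList).map String.ofList := by
    have h3 := splitOn_eq_mySplit s.toList nlSep (by decide)
    simp [PySem.Str.split?, PySem.Chars.split?]
    rw [show (['\n'] : List Char) = nlSep from rfl, h3]
  rw [h1, List.foldl_map]
  have h2 : ∀ (st : List (List (String × String)) × Option (PySem.Dict String String))
      (l : List Char),
      (let (res, cur, line) :=
        if PySem.Str.startswith (String.ofList l) "-" then
          ((match st.2 with | some d => st.1 ++ [d.items] | none => st.1),
           (some PySem.Dict.empty : Option (PySem.Dict String String)),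
           PySem.Str.slice (String.ofList l) (some 1) none)
        else (st.1, st.2, String.ofList l)
       match cur with
       | none => (res, none)
       | some d =>
         let t := PySem.Str.strip line
         if t = "" then (res, some d)
         else
           match t.toList.dropWhile (· ≠ ':') with
           | [] => (res, some (d.insert (PySem.Str.strip t) (PySem.Str.strip "")))
           | _ :: r => (res, some (d.insert
               (PySem.Str.strip (String.ofList (t.toList.takeWhile (· ≠ ':'))))
               (PySem.Str.strip (String.ofList r))))) = stepBC st l := by
    intro st l
    rw [startswith_dash, slice_tail, stepBC]
    rcases st with ⟨res, cur⟩
    by_cases hx : l.head? = some '-'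
    · rw [if_pos hx]
      simp only [decide_eq_true hx, if_true]
      cases cur <;> dsimp only [flushB] <;> rw [fieldPair_char]
    · rw [if_neg hx]
      simp only [decide_eq_false hx, Bool.false_eq_true, if_false]
      cases cur
      · rfl
      · dsimp only
        rw [fieldPair_char]
  rw [PySem.List.foldl_congr_mem _ _ stepBC ([], none) (fun acc x _ => h2 acc x)]
  rcases ((mySplit nlSep s.toList).foldl stepBC ([], none)) with ⟨res, _ | d⟩ <;>
    simp [flushB]

theorem split_strip_char (b : List Char) :
    (PySem.Str.split? (PySem.Str.strip (String.ofList b)) "\n").getD []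
      = (mySplit nlSep (PySem.Chars.strip b)).map String.ofList := by
  have h3 := splitOn_eq_mySplit (PySem.Chars.strip b) nlSep (by decide)
  simp [PySem.Str.split?, PySem.Chars.split?, PySem.Str.strip]
  rw [show (['\n'] : List Char) = nlSep from rfl, h3]

theorem pre_char (s : String) (h : Pre_parse_apis s) :
    ∀ b ∈ (mySplit ndSep s.toList).drop 1, ∀ l ∈ mySplit nlSep (PySem.Chars.strip b), ':' ∈ l := by
  intro b hb l hl
  have hmem1 : String.ofList b ∈ ((PySem.Str.split? s "\n-").getD []).drop 1 := by
    have h1 : (PySem.Str.split? s "\n-").getD []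
        = (mySplit ndSep s.toList).map String.ofList := by
      have h3 := splitOn_eq_mySplit s.toList ndSep (by decide)
      simp [PySem.Str.split?, PySem.Chars.split?]
      rw [show (['\n', '-'] : List Char) = ndSep from rfl, h3]
    rw [h1, ← List.map_drop]
    exact List.mem_map_of_mem hb
  have hmem2 : String.ofList l ∈ (PySem.Str.split? (PySem.Str.strip (String.ofList b)) "\n").getD [] := by
    rw [split_strip_char]
    exact List.mem_map_of_mem hl
  have := h.2 (String.ofList b) hmem1 (String.ofList l) hmem2
  rw [show (":" : String) = String.ofList [':'] from rfl] at this
  simp only [PySem.Str.isIn, String.toList_ofList] at this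
  rw [PySem.Chars.isIn_iff_infix] at this
  exact (List.singleton_infix_iff ':' l).mp this

-- the first line of the line-split starts with '-' only if the string itself does
theorem first_line_head (s : String) (l0 : List Char) (ls : List (List Char))
    (hsp : mySplit nlSep s.toList = l0 :: ls) (hs : PySem.Str.startswith s "-" = false) :
    l0.head? ≠ some '-' := by
  have hs' : ¬ List.isPrefixOf ['-'] s.toList = true := by
    have : PySem.Str.startswith s "-" = List.isPrefixOf ['-'] s.toList := by
      simp [PySem.Str.startswith, PySem.Chars.startswith]
    rw [this] at hs; simp [hs]
  cases hcs : s.toList with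
  | nil =>
    rw [hcs] at hsp; simp [mySplit] at hsp
    simp [hsp.1]
  | cons c r =>
    rw [hcs] at hsp hs'
    by_cases hc : c = '\n'
    · subst hc
      rw [mySplit_nl_cons_nl] at hsp
      have : l0 = [] := by simpa using (List.cons.injEq _ _ _ _ ▸ hsp).1.symm
      simp [this]
    · rcases mySplit_head_cons c r hc with ⟨hh, tt, heq⟩
      rw [heq] at hsp
      have : l0 = c :: hh := by simpa using (List.cons.injEq _ _ _ _ ▸ hsp).1.symm
      rw [this]
      intro hcon
      simp at hcon
      exact hs' (by simp [List.isPrefixOf, hcon])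

theorem main_equal (s : String) (hP : Pre_parse_apis s) : parse_apis s = parse_apis_alt s := by
  rw [portA_char, portB_char]
  rcases hsp : mySplit nlSep s.toList with _ | ⟨l0, ls⟩
  · exact absurd hsp (mySplit_ne_nil _ _)
  · have hPc := pre_char s hP
    have hl0 : l0.head? ≠ some '-' := first_line_head s l0 ls hsp hP.1
    have hnd : mySplit ndSep s.toList = glue l0 ls := by
      rw [mySplit_nd_eq_glue, hsp]; rfl
    rw [hnd]
    rw [List.foldl_cons, show stepBC ([], none) l0 = ([], none) from by simp [stepBC, hl0]]
    rw [List.drop_one, tail_glue]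
    rw [fold_none ls []
      (fun l hl => noNL_mySplit s.toList l (by rw [hsp]; exact List.mem_cons_of_mem _ hl))
      (by intro bb hbb
          refine hPc bb ?_
          rw [hnd, List.drop_one, tail_glue]
          exact hbb)]
    simp

-- ===== VERDICT (by name: the statement is the Claim_ definition above) =====
theorem parse_apis_spec : Claim_equal_parse_apis := by
  intro s _ hP
  exact main_equal s hP
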